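-- pv_equiv track=rewrite | github.com/Agentic-Environmental-Engineering/GymVerse | gem/gem/envs/RLVE/segment_min_length_equal_counting_env.py | _compute_reference_answer
-- ===== SOURCE A (Python) =====
-- from typing import Any, Optional, SupportsFloat, Tuple, Dict, List
-- from bisect import bisect_left
--
-- def _compute_reference_answer(N: int, S: List[int], MOD: int) -> int:
--     """Compute the number of valid arrays modulo MOD using dynamic programming."""
--
--     def quick_power(a: int, e: int, m: int) -> int:
--         # Fast modular exponentiation
--         res = 1
--         a %= m
--         while e:
--             if e & 1:
--                 res = (res * a) % m
--             a = (a * a) % m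
--             e >>= 1
--         return res
--
--     M = len(S)
--     exist_set = set(S)
--
--     # C[i] = count of elements in S >= i, for i in 1..N
--     C = [0] * (N + 1)
--     for i in range(1, N + 1):
--         C[i] = M - bisect_left(S, i)
--
--     # DP: F[i] = number of valid arrays of length i
--     F = [0] * (N + 1)
--     F[0] = 1
--
--     for i in range(1, N + 1):
--         total = 0
--         for j in range(i):
--             L = i - j  # length of the last segment
--             if L in exist_set:
--                 cL = C[L]
--                 # ways to fill a segment of length L with min exactly L:
--                 ways = (quick_power(cL, L, MOD) - quick_power(cL - 1, L, MOD) + MOD) % MOD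
--                 total = (total + F[j] * ways) % MOD
--         F[i] = total
--
--     return F[N] % MOD
-- ===== SOURCE B (Python) =====
-- from bisect import bisect_left
--
--
-- def _compute_reference_answer(N, S, MOD):
--     """Same DP, but segment-ways are precomputed once per distinct usable length
--     instead of being recomputed inside the quadratic double loop."""
--     M = len(S)
--
--     def seg_ways(L):
--         # elements of S that are >= L (per bisect on S as given)
--         c = M - bisect_left(S, L)
--         return (pow(c, L, MOD) - pow(c - 1, L, MOD)) % MOD
--
--     # distinct usable segment lengths, largest first (matches the order the
--     # naive inner loop visits them), with their ways precomputed in parallel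
--     Ls = [L for L in sorted(set(S), reverse=True) if 1 <= L <= N]
--     ways = [seg_ways(L) for L in Ls]
--
--     F = [0] * (N + 1)
--     F[0] = 1
--     for i in range(1, N + 1):
--         total = 0
--         for L, w in zip(Ls, ways):
--             if L <= i:
--                 total = (total + F[i - L] * w) % MOD
--         F[i] = total
--     return F[N] % MOD
-- ===== Notes on version B (the rewrite author's own statement) =====
-- stated objective: faster
-- what changed: Instead of scanning all i previous positions per DP state and recomputing the segment count C[L] and two modular powers inside the quadratic inner loop, B precomputes ways[L] once for each distinct usable segment length L of S and sums the DP recurrence only over those lengths.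
import Mathlib
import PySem

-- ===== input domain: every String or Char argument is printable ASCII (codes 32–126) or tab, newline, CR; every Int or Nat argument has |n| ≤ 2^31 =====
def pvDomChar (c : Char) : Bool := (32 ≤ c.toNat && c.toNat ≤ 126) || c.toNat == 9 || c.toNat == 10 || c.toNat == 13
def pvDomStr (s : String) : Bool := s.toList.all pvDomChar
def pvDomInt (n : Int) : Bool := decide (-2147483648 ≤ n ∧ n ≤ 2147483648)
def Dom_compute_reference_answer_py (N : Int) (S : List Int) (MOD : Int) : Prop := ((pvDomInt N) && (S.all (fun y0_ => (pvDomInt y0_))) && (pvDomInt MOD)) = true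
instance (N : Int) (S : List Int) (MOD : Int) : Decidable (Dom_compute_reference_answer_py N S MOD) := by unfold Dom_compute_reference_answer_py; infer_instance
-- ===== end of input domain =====

-- B replaces A's quadratic inner scan over all previous positions by a scan over the
-- (precomputed) distinct usable segment lengths; objective: faster.

-- ===== PORT A =====
-- quick_power's while-loop; e is consumed as a nonnegative bit string (every call
-- in A has e = segment length ≥ 1; Python does not terminate for e < 0).
def quickPowerAux (m res a : Int) (e : Nat) : Int :=
  if e = 0 then res
  else quickPowerAux m (if e % 2 = 1 then PySem.Int.mod (res * a) m else res)
        (PySem.Int.mod (a * a) m) (e / 2)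
termination_by e
decreasing_by omega

def quickPower (a e m : Int) : Int :=
  quickPowerAux m 1 (PySem.Int.mod a m) e.toNat

def compute_reference_answer_py (N : Int) (S : List Int) (MOD : Int) : Int :=
  let M : Int := PySem.List.len S
  let exist_set : PySem.Set Int := PySem.Set.ofList S
  -- C[i] = M - bisect_left(S, i) for i in 1..N
  let C : List Int := (PySem.List.pyRange 1 (N + 1) 1).foldl
      (fun C i => PySem.List.pySetD C i (M - (PySem.List.bisectLeft S i : Int)))
      (List.replicate (N + 1).toNat 0)
  let F0 : List Int := PySem.List.pySetD (List.replicate (N + 1).toNat (0 : Int)) 0 1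
  let F : List Int := (PySem.List.pyRange 1 (N + 1) 1).foldl (fun F i =>
      let total := (PySem.List.pyRange 0 i 1).foldl (fun total j =>
          if (i - j) ∈ exist_set then
            PySem.Int.mod (total + PySem.List.pyGetD F j 0 *
              (PySem.Int.mod (quickPower (PySem.List.pyGetD C (i - j) 0) (i - j) MOD -
                quickPower (PySem.List.pyGetD C (i - j) 0 - 1) (i - j) MOD + MOD) MOD)) MOD
          else total) 0
      PySem.List.pySetD F i total) F0
  PySem.Int.mod (PySem.List.pyGetD F N 0) MOD

-- ===== PORT B =====
-- ways for one segment of length L (pow(c, L, MOD) with L ≥ 1 at every call site)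
def segWays (S : List Int) (M MOD L : Int) : Int :=
  PySem.Int.mod (PySem.Int.powMod (M - (PySem.List.bisectLeft S L : Int)) L.toNat MOD -
    PySem.Int.powMod (M - (PySem.List.bisectLeft S L : Int) - 1) L.toNat MOD) MOD

def compute_reference_answer_py_alt (N : Int) (S : List Int) (MOD : Int) : Int :=
  let M : Int := PySem.List.len S
  let Ls : List Int := (PySem.List.sorted (PySem.Set.ofList S) (fun x => x) true).filter
      (fun L => decide (1 ≤ L ∧ L ≤ N))
  let ways : List Int := Ls.map (fun L => segWays S M MOD L)
  let F0 : List Int := PySem.List.pySetD (List.replicate (N + 1).toNat (0 : Int)) 0 1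
  let F : List Int := (PySem.List.pyRange 1 (N + 1) 1).foldl (fun F i =>
      let total := (Ls.zip ways).foldl (fun total p =>
          if p.1 ≤ i then
            PySem.Int.mod (total + PySem.List.pyGetD F (i - p.1) 0 * p.2) MOD
          else total) 0
      PySem.List.pySetD F i total) F0
  PySem.Int.mod (PySem.List.pyGetD F N 0) MOD

-- ===== PRECONDITION & SPEC =====
-- Pre_ excludes exactly the raising inputs: N < 0 (IndexError on F[0] = 1) and
-- MOD = 0 (ZeroDivisionError); A returns normally on every other input.
def Pre_compute_reference_answer_py (N : Int) (S : List Int) (MOD : Int) : Prop :=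
  0 ≤ N ∧ MOD ≠ 0
instance (N : Int) (S : List Int) (MOD : Int) : Decidable (Pre_compute_reference_answer_py N S MOD) := by unfold Pre_compute_reference_answer_py; infer_instance

def pvWitness_compute_reference_answer_py : Int × List Int × Int := (3, [1, 2], 5)

def Spec_compute_reference_answer_py (N : Int) (S : List Int) (MOD : Int) (out : Int) : Prop := out = compute_reference_answer_py_alt N S MOD
instance (N : Int) (S : List Int) (MOD : Int) (out : Int) : Decidable (Spec_compute_reference_answer_py N S MOD out) := by unfold Spec_compute_reference_answer_py; infer_instance

-- ===== CLAIM (what is proved, stated in full; the proofs are below) =====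
def Claim_equal_compute_reference_answer_py : Prop := ∀ (N : Int) (S : List Int) (MOD : Int), Dom_compute_reference_answer_py N S MOD → Pre_compute_reference_answer_py N S MOD → Spec_compute_reference_answer_py N S MOD (compute_reference_answer_py N S MOD)

-- ===== LEMMAS AND PROOFS =====

-- x.fmod m is congruent to x
theorem pv_fmod_modEq (m x : Int) : x.fmod m ≡ x [ZMOD m] := by
  rw [Int.modEq_iff_dvd]
  exact ⟨x.fdiv m, by rw [Int.fmod_def]; ring⟩

-- congruent numbers have equal fmod
theorem pv_fmod_eq_of_modEq {m x y : Int} (h : x ≡ y [ZMOD m]) : x.fmod m = y.fmod m := by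
  obtain ⟨k, hk⟩ := Int.modEq_iff_dvd.mp h
  have hy : y = x + m * k := by linarith
  rw [hy, Int.add_mul_fmod_self_left]

-- A's quick_power loop computes the fmod of the power
theorem quickPowerAux_eq (m : Int) : ∀ (e : Nat), e ≠ 0 → ∀ (res a : Int),
    quickPowerAux m res a e = (res * a ^ e).fmod m := by
  intro e
  induction e using Nat.strong_induction_on with
  | _ e ih =>
    intro he res a
    rw [quickPowerAux]
    simp only [he, if_false]
    by_cases hk : e / 2 = 0
    · have he1 : e = 1 := by omega
      subst he1
      rw [quickPowerAux]
      simp [PySem.Int.mod]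
    · have hlt : e / 2 < e := by omega
      rw [ih (e / 2) hlt hk]
      have hres' : (if e % 2 = 1 then PySem.Int.mod (res * a) m else res) ≡
          res * a ^ (e % 2) [ZMOD m] := by
        by_cases hb : e % 2 = 1
        · simp only [hb, if_true, pow_one, PySem.Int.mod]
          exact pv_fmod_modEq m (res * a)
        · have hb0 : e % 2 = 0 := by omega
          simp [hb0]
      have ha' : (PySem.Int.mod (a * a) m) ^ (e / 2) ≡ (a * a) ^ (e / 2) [ZMOD m] := by
        exact Int.ModEq.pow _ (pv_fmod_modEq m (a * a))
      have : (if e % 2 = 1 then PySem.Int.mod (res * a) m else res) *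
          (PySem.Int.mod (a * a) m) ^ (e / 2) ≡ res * a ^ e [ZMOD m] := by
        calc (if e % 2 = 1 then PySem.Int.mod (res * a) m else res) *
              (PySem.Int.mod (a * a) m) ^ (e / 2)
            ≡ (res * a ^ (e % 2)) * (a * a) ^ (e / 2) [ZMOD m] := Int.ModEq.mul hres' ha'
          _ = res * a ^ e := by
              rw [mul_assoc, ← pow_two, ← pow_mul, ← pow_add]
              have h2 : e % 2 + 2 * (e / 2) = e := by omega
              rw [h2]
      exact pv_fmod_eq_of_modEq this

-- quick_power agrees with three-argument pow for positive exponents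
theorem quickPower_eq_powMod (a e m : Int) (he : 0 < e) :
    quickPower a e m = PySem.Int.powMod a e.toNat m := by
  have hne : e.toNat ≠ 0 := by omega
  rw [quickPower, quickPowerAux_eq m e.toNat hne, PySem.Int.powMod]
  simp only [one_mul, PySem.Int.mod]
  exact pv_fmod_eq_of_modEq (Int.ModEq.pow _ (pv_fmod_modEq m a))

-- reading back an index-writing loop over range(lo, hi)
theorem pv_foldl_set_getD (g : Int → Int) : ∀ (n : Nat) (lo hi : Int) (xs : List Int),
    (hi - lo).toNat = n → 0 ≤ lo → hi ≤ xs.length → ∀ (k : Int), 0 ≤ k →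
    PySem.List.pyGetD ((PySem.List.pyRange lo hi 1).foldl
        (fun C i => PySem.List.pySetD C i (g i)) xs) k 0
      = if lo ≤ k ∧ k < hi then g k else PySem.List.pyGetD xs k 0 := by
  intro n
  induction n with
  | zero =>
    intro lo hi xs hn _ _ k _
    have : hi ≤ lo := by omega
    rw [PySem.List.pyRange_one_eq_nil this]
    simp only [List.foldl_nil]
    have : ¬ (lo ≤ k ∧ k < hi) := by omega
    rw [if_neg this]
  | succ n ih =>
    intro lo hi xs hn hlo hhi k hk
    have hlt : lo < hi := by omega
    rw [PySem.List.pyRange_one_cons hlt]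
    simp only [List.foldl_cons]
    have hlen : (PySem.List.pySetD xs lo (g lo)).length = xs.length := by
      simp [PySem.List.length_pySetD]
    have := ih (lo + 1) hi (PySem.List.pySetD xs lo (g lo)) (by omega) (by omega)
      (by rw [hlen]; exact hhi) k hk
    rw [this]
    have hcast : lo = ((lo.toNat : Nat) : Int) := by omega
    have hkcast : k = ((k.toNat : Nat) : Int) := by omega
    have hset : PySem.List.pyGetD (PySem.List.pySetD xs lo (g lo)) k 0
        = if k = lo then g lo else PySem.List.pyGetD xs k 0 := by
      rw [hcast, hkcast,
        PySem.List.pyGetD_pySetD_natCast xs lo.toNat k.toNat (g ↑lo.toNat) 0 (by omega)]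
      split_ifs with h1 h2 h2
      · rfl
      · exact absurd (by omega : (k.toNat : Int) = ↑lo.toNat) h2
      · exact absurd (by omega : k.toNat = lo.toNat) h1
      · rfl
    rw [hset]
    by_cases h2 : k = lo
    · subst h2; split_ifs <;> first | rfl | omega
    · split_ifs <;> first | rfl | omega

-- a mod-accumulating conditional loop is the fmod of the filtered sum
theorem pv_foldl_mod_sum {α : Type} (m : Int) (p : α → Prop) [DecidablePred p]
    (f : α → Int) : ∀ (l : List α) (t : Int), t.fmod m = t →
    l.foldl (fun t x => if p x then PySem.Int.mod (t + f x) m else t) t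
      = PySem.Int.mod (t + ((l.filter (fun x => decide (p x))).map f).sum) m := by
  intro l
  induction l with
  | nil => intro t ht; simpa [PySem.Int.mod] using ht.symm
  | cons x l ih =>
    intro t ht
    simp only [List.foldl_cons, List.filter_cons]
    by_cases hp : p x
    · simp only [hp, decide_true, if_true, List.map_cons, List.sum_cons]
      rw [ih (PySem.Int.mod (t + f x) m) (by simp [PySem.Int.mod])]
      simp only [PySem.Int.mod]
      rw [Int.fmod_add_fmod, add_assoc]
    · simp only [hp, decide_false, Bool.false_eq_true, if_false]
      rw [ih t ht]

-- two strictly descending integer lists with the same members are equal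
theorem pv_desc_eq (l1 l2 : List Int) (h1 : l1.Pairwise (· > ·)) (h2 : l2.Pairwise (· > ·))
    (hm : ∀ a, a ∈ l1 ↔ a ∈ l2) : l1 = l2 := by
  have n1 : l1.Nodup := h1.imp (fun h => ne_of_gt h)
  have n2 : l2.Nodup := h2.imp (fun h => ne_of_gt h)
  have hp : l1.Perm l2 := (List.perm_ext_iff_of_nodup n1 n2).mpr hm
  exact List.Perm.eq_of_pairwise (fun a b _ _ hab hba => by omega)
    (h1.imp fun h => le_of_lt h) (h2.imp fun h => le_of_lt h) hp

-- the descending range [i, i-1, …, 1] is range(0, i) reflected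
theorem pv_map_range_desc (i : Int) :
    (PySem.List.pyRange 0 i 1).map (fun j => i - j) = PySem.List.pyRange i 0 (-1) := by
  rw [PySem.List.pyRange_one, PySem.List.pyRange_neg_one]
  simp [List.map_map, Function.comp_def]


theorem pv_sum_reindex (i : Int) (P : Int → Prop) [DecidablePred P] (u w : Int → Int) :
    ((PySem.List.pyRange 0 i 1).filter (fun j => decide (P (i - j)))).map
      (fun j => u j * w (i - j)) =
    ((PySem.List.pyRange i 0 (-1)).filter (fun L => decide (P L))).map
      (fun L => u (i - L) * w L) := by
  rw [← pv_map_range_desc i, List.filter_map, List.map_map]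
  simp only [Function.comp_def, sub_sub_cancel]

-- the inner loops agree: A's scan over positions equals B's scan over usable lengths
theorem pv_inner_eq (N : Int) (S : List Int) (MOD : Int) (i : Int) (F : List Int)
    (h1 : 1 ≤ i) (h2 : i ≤ N) :
    (PySem.List.pyRange 0 i 1).foldl (fun total j =>
        if (i - j) ∈ PySem.Set.ofList S then
          PySem.Int.mod (total + PySem.List.pyGetD F j 0 *
            (PySem.Int.mod (quickPower (PySem.List.pyGetD
                ((PySem.List.pyRange 1 (N + 1) 1).foldl
                  (fun C i => PySem.List.pySetD C i ((PySem.List.len S) - (PySem.List.bisectLeft S i : Int)))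
                  (List.replicate (N + 1).toNat 0)) (i - j) 0) (i - j) MOD -
              quickPower (PySem.List.pyGetD
                ((PySem.List.pyRange 1 (N + 1) 1).foldl
                  (fun C i => PySem.List.pySetD C i ((PySem.List.len S) - (PySem.List.bisectLeft S i : Int)))
                  (List.replicate (N + 1).toNat 0)) (i - j) 0 - 1) (i - j) MOD + MOD) MOD)) MOD
        else total) 0
    = (((PySem.List.sorted (PySem.Set.ofList S) (fun x => x) true).filter
          (fun L => decide (1 ≤ L ∧ L ≤ N))).zip
        (((PySem.List.sorted (PySem.Set.ofList S) (fun x => x) true).filter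
          (fun L => decide (1 ≤ L ∧ L ≤ N))).map
          (fun L => segWays S (PySem.List.len S) MOD L))).foldl (fun total p =>
        if p.1 ≤ i then
          PySem.Int.mod (total + PySem.List.pyGetD F (i - p.1) 0 * p.2) MOD
        else total) 0 := by
  have h0 : (0 : Int).fmod MOD = 0 := Int.zero_fmod MOD
  have hC : ∀ L : Int, 1 ≤ L → L ≤ N →
      PySem.List.pyGetD ((PySem.List.pyRange 1 (N + 1) 1).foldl
        (fun C i => PySem.List.pySetD C i ((PySem.List.len S) - (PySem.List.bisectLeft S i : Int)))
        (List.replicate (N + 1).toNat 0)) L 0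
      = (PySem.List.len S) - (PySem.List.bisectLeft S L : Int) := by
    intro L hL1 hL2
    rw [pv_foldl_set_getD (fun t => (PySem.List.len S) - (PySem.List.bisectLeft S t : Int))
      N.toNat 1 (N + 1) (List.replicate (N + 1).toNat 0) (by omega) (by omega)
      (by simp only [List.length_replicate]; omega) L (by omega)]
    rw [if_pos (by omega)]
  have hdrop : ∀ x y : Int, PySem.Int.mod (x - y + MOD) MOD = PySem.Int.mod (x - y) MOD := by
    intro x y
    simp only [PySem.Int.mod]
    rw [show x - y + MOD = x - y + MOD * 1 by ring, Int.add_mul_fmod_self_left]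
  rw [PySem.List.foldl_congr_mem _ _ (fun total j =>
      if (i - j) ∈ PySem.Set.ofList S then
        PySem.Int.mod (total + PySem.List.pyGetD F j 0 *
          segWays S (PySem.List.len S) MOD (i - j)) MOD
      else total) 0 ?hbody]
  case hbody =>
    intro total j hj
    have hjr := (PySem.List.mem_pyRange_one).mp hj
    simp only []
    by_cases hmem : (i - j) ∈ PySem.Set.ofList S
    · rw [if_pos hmem, if_pos hmem, hC (i - j) (by omega) (by omega),
        quickPower_eq_powMod _ _ _ (by omega : (0:Int) < i - j),
        quickPower_eq_powMod _ _ _ (by omega : (0:Int) < i - j), hdrop]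
      simp only [segWays]
    · rw [if_neg hmem, if_neg hmem]
  rw [pv_foldl_mod_sum MOD _ _ _ 0 h0, pv_foldl_mod_sum MOD _ _ _ 0 h0]
  simp only [zero_add]
  congr 2
  rw [pv_sum_reindex i (fun L => L ∈ PySem.Set.ofList S)
    (fun j => PySem.List.pyGetD F j 0) (fun L => segWays S (PySem.List.len S) MOD L)]
  rw [← List.map_prod_left_eq_zip, List.filter_map, List.map_map]
  simp only [Function.comp_def]
  congr 1
  apply pv_desc_eq
  · apply List.Pairwise.filter
    rw [PySem.List.pyRange_neg_one_eq_reverse, List.pairwise_reverse]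
    exact PySem.List.pairwise_lt_pyRange_one 1 (i + 1)
  · apply List.Pairwise.filter
    apply List.Pairwise.filter
    have hge := PySem.List.sorted_pairwise_rev (PySem.Set.ofList S) (fun x : Int => x)
    have hnd : (PySem.List.sorted (PySem.Set.ofList S) (fun x : Int => x) true).Nodup :=
      (PySem.List.sorted_perm (PySem.Set.ofList S) (fun x : Int => x) true).nodup_iff.mpr
        (PySem.Set.nodup_ofList S)
    exact (hge.and hnd).imp (fun h => lt_of_le_of_ne h.1 (Ne.symm h.2))
  · intro a
    rw [List.mem_filter, List.mem_filter, List.mem_filter,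
      (PySem.List.sorted_perm _ _ _).mem_iff, PySem.List.mem_pyRange_neg_one]
    simp only [decide_eq_true_eq, PySem.Set.mem_ofList]
    constructor
    · rintro ⟨⟨h0i, hai⟩, haS⟩
      exact ⟨⟨haS, by omega⟩, by omega⟩
    · rintro ⟨⟨haS, h1N⟩, hai⟩
      exact ⟨⟨by omega, hai⟩, haS⟩


-- ===== VERDICT (by name: the statement is the Claim_ definition above) =====
theorem compute_reference_answer_py_spec : Claim_equal_compute_reference_answer_py := by
  intro N S MOD _ hpre
  obtain ⟨hN, hmod⟩ := hpre
  unfold Spec_compute_reference_answer_py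
  unfold compute_reference_answer_py compute_reference_answer_py_alt
  simp only []
  congr 2
  apply PySem.List.foldl_congr_mem
  intro F i hi
  have hmem := (PySem.List.mem_pyRange_one).mp hi
  congr 1
  exact pv_inner_eq N S MOD i F (by omega) (by omega)
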